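-- pv_equiv track=rewrite | github.com/AT-Lorlando/Yui | src/voice_pipeline.py | _find_sentence_end
-- ===== SOURCE A (Python) =====
-- def _find_sentence_end(buf: str) -> int:
--     """
--     Return the index of the first sentence-ending character (. ! ?)
--     that is followed by whitespace (or is at end of string).
--     Ignores decimal numbers like '3.5' by checking the char before '.'.
--     Returns -1 if no boundary found yet.
--     """
--     for i, ch in enumerate(buf):
--         if ch in ".!?" and i >= 5:
--             # Don't split on decimal numbers (digit before '.')
--             if ch == "." and i > 0 and buf[i - 1].isdigit():
--                 continue
--             next_ch = buf[i + 1] if i + 1 < len(buf) else " "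
--             if next_ch in " \n\r\t":
--                 return i
--     return -1
-- ===== SOURCE B (Python) =====
-- import re
--
-- # A terminator: '.' not preceded by a digit, or '!' / '?', followed by
-- # whitespace-from-A's-set or end of string (zero-width lookahead).
-- _SENT_RE = re.compile(r'(?:(?<!\d)\.|[!?])(?=[ \n\r\t]|$)')
--
--
-- def _find_sentence_end(buf: str) -> int:
--     for m in _SENT_RE.finditer(buf):
--         if m.start() >= 5:
--             return m.start()
--     return -1
-- ===== Notes on version B (the rewrite author's own statement) =====
-- stated objective: idiomatic
-- what changed: Replaces A's manual per-character branch ladder (with its digit-skip continue and ad-hoc next-character default) by a compiled regex (?:(?<!\d)\.|[!?])(?=[ \n\r\t]|$) over finditer, returning the first match start >= 5.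
import Mathlib
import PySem

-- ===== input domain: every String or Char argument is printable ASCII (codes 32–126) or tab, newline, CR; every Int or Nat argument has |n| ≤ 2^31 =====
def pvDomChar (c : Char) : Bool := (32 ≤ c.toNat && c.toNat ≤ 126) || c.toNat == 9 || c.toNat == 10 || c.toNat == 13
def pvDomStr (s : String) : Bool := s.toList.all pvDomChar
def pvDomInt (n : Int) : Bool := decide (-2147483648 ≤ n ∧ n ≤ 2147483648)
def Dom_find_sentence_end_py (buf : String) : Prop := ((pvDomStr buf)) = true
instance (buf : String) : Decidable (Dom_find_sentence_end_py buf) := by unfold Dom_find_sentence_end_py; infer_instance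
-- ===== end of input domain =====

-- B replaces A's manual per-character branch ladder by a compiled regex
-- ((?:(?<!\d)\.|[!?])(?=[ \n\r\t]|$)), taking the first match start ≥ 5 (objective: idiomatic).

-- ===== PORT A =====
-- A's `for i, ch in enumerate(buf)` loop: structural recursion over the characters
-- with the running index i; buf[i-1] / buf[i+1] are in-range lookups (guarded by
-- `i > 0` resp. `i + 1 < len(buf)`), ported as getD. Char.isDigit is exact for
-- str.isdigit on the ASCII domain.
def pvALoop (cs : List Char) : Nat → List Char → Int
  | _, [] => -1
  | i, ch :: rest =>
    if (ch = '.' || ch = '!' || ch = '?') && decide (5 ≤ i) then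
      if (decide (ch = '.') && decide (0 < i)) && (cs.getD (i - 1) ' ').isDigit then
        pvALoop cs (i + 1) rest
      else
        let next_ch := if i + 1 < cs.length then cs.getD (i + 1) ' ' else ' '
        if next_ch = ' ' || next_ch = '\n' || next_ch = '\r' || next_ch = '\t' then (i : Int)
        else pvALoop cs (i + 1) rest
    else pvALoop cs (i + 1) rest

def find_sentence_end_py (buf : String) : Int :=
  pvALoop buf.toList 0 buf.toList

-- ===== PORT B =====
-- Hand port of the regex (?:(?<!\d)\.|[!?])(?=[ \n\r\t]|$) matched at position i:
-- the atom consumes one char (so i < length); the lookbehind (?<!\d) applies only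
-- to the '.' alternative; the lookahead is the char class or end of string ('$'
-- additionally matches before a final '\n', which the '\n' in the class subsumes,
-- so this is exact). finditer's non-overlap rule is vacuous for 1-char matches.
def pvMatchAt (cs : List Char) (i : Nat) : Bool :=
  decide (i < cs.length) &&
  (let c := cs.getD i ' '
   if c = '.' then !(decide (0 < i) && (cs.getD (i - 1) ' ').isDigit)
   else c = '!' || c = '?') &&
  (decide (i + 1 = cs.length) ||
   (let d := cs.getD (i + 1) ' '
    d = ' ' || d = '\n' || d = '\r' || d = '\t'))

def find_sentence_end_py_alt (buf : String) : Int :=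
  let cs := buf.toList
  match ((List.range cs.length).filter (pvMatchAt cs)).find? (fun i => decide (5 ≤ i)) with
  | some i => (i : Int)
  | none => -1

-- ===== PRECONDITION & SPEC =====
def Spec_find_sentence_end_py (buf : String) (out : Int) : Prop := out = find_sentence_end_py_alt buf
instance (buf : String) (out : Int) : Decidable (Spec_find_sentence_end_py buf out) := by unfold Spec_find_sentence_end_py; infer_instance

-- ===== CLAIM (what is proved, stated in full; the proofs are below) =====
def Claim_equal_find_sentence_end_py : Prop := ∀ (buf : String), Dom_find_sentence_end_py buf → Spec_find_sentence_end_py buf (find_sentence_end_py buf)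

-- ===== LEMMAS AND PROOFS =====

-- A's ladder at one in-range position agrees with "regex match ∧ index ≥ 5"
theorem pv_cond_eq (cs : List Char) (i : Nat) (ch : Char) (h1 : i < cs.length)
    (h2 : cs.getD i ' ' = ch) :
    ((ch = '.' || ch = '!' || ch = '?') && decide (5 ≤ i) &&
      !((decide (ch = '.') && decide (0 < i)) && (cs.getD (i - 1) ' ').isDigit) &&
      (let next_ch := if i + 1 < cs.length then cs.getD (i + 1) ' ' else ' '
       next_ch = ' ' || next_ch = '\n' || next_ch = '\r' || next_ch = '\t'))
    = (pvMatchAt cs i && decide (5 ≤ i)) := by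
  simp only [pvMatchAt, h2, h1, decide_true, Bool.true_and]
  by_cases h5 : 5 ≤ i
  · by_cases hn : i + 1 < cs.length
    · have hne : ¬ (i + 1 = cs.length) := by omega
      by_cases hd : ch = '.' <;> simp [hd, hn, hne, h5]
    · have he : i + 1 = cs.length := by omega
      by_cases hd : ch = '.' <;> simp [hd, he, h5]
  · simp [h5]

-- main invariant: the loop from index i over the suffix equals find? over range' i
theorem pv_aLoop_eq (cs : List Char) : ∀ (suff : List Char) (i : Nat), cs.drop i = suff →
    pvALoop cs i suff =
      (match (List.range' i suff.length).find? (fun j => pvMatchAt cs j && decide (5 ≤ j)) with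
       | some j => (j : Int)
       | none => -1) := by
  intro suff
  induction suff with
  | nil => intro i _; simp [pvALoop]
  | cons ch rest ih =>
    intro i hdrop
    have hlen : i < cs.length := by
      by_contra h
      simp [List.drop_eq_nil_of_le (Nat.le_of_not_lt h)] at hdrop
    have hget : cs.getD i ' ' = ch := by
      have h0 : (cs.drop i)[0]? = some ch := by rw [hdrop]; rfl
      rw [List.getElem?_drop] at h0
      simp at h0
      simp [List.getD, h0]
    have hrest : cs.drop (i + 1) = rest := by
      have h1 : (cs.drop i).drop 1 = rest := by rw [hdrop]; rfl
      rw [List.drop_drop] at h1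
      simpa using h1
    have hcond := pv_cond_eq cs i ch hlen hget
    have hrec := ih (i + 1) hrest
    rw [show (ch :: rest).length = rest.length + 1 from rfl, List.range'_succ, List.find?_cons]
    by_cases hQ : (pvMatchAt cs i && decide (5 ≤ i)) = true
    · -- A must return i here: peel the ladder using the components of the condition
      have hA := hQ
      rw [← hcond] at hA
      have h1 := (Bool.and_eq_true _ _).mp hA
      have h2 := (Bool.and_eq_true _ _).mp h1.1
      have hT5 := h2.1
      have hS : ((decide (ch = '.') && decide (0 < i)) && (cs.getD (i - 1) ' ').isDigit) = false := by
        have hn := h2.2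
        revert hn
        cases (decide (ch = '.') && decide (0 < i)) && (cs.getD (i - 1) ' ').isDigit <;> simp
      have hW := h1.2
      have hm : pvMatchAt cs i = true := ((Bool.and_eq_true _ _).mp hQ).1
      have hL : pvALoop cs i (ch :: rest) = (i : Int) := by
        simp only [pvALoop]
        rw [if_pos hT5, if_neg (fun h => by rw [hS] at h; exact absurd h (by decide))]
        show (if ((if i + 1 < cs.length then cs.getD (i + 1) ' ' else ' ') = ' ' || (if i + 1 < cs.length then cs.getD (i + 1) ' ' else ' ') = '\n' || (if i + 1 < cs.length then cs.getD (i + 1) ' ' else ' ') = '\r' || (if i + 1 < cs.length then cs.getD (i + 1) ' ' else ' ') = '\t') = true then ((i : Nat) : Int) else pvALoop cs (i + 1) rest) = _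
        rw [if_pos hW]
      rw [hL]
      have h5 : decide (5 ≤ i) = true := ((Bool.and_eq_true _ _).mp hQ).2
      simp [hm, h5]
    · -- A recurses here
      simp only [Bool.not_eq_true] at hQ
      have hA : ((ch = '.' || ch = '!' || ch = '?') && decide (5 ≤ i) &&
          !((decide (ch = '.') && decide (0 < i)) && (cs.getD (i - 1) ' ').isDigit) &&
          (let next_ch := if i + 1 < cs.length then cs.getD (i + 1) ' ' else ' '
           next_ch = ' ' || next_ch = '\n' || next_ch = '\r' || next_ch = '\t')) = false := by
        rw [hcond]; exact hQ
      have hL : pvALoop cs i (ch :: rest) = pvALoop cs (i + 1) rest := by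
        by_cases ht : ((ch = '.' || ch = '!' || ch = '?') && decide (5 ≤ i)) = true
        · by_cases hs : ((decide (ch = '.') && decide (0 < i)) && (cs.getD (i - 1) ' ').isDigit) = true
          · simp only [pvALoop]
            rw [if_pos ht, if_pos hs]
          · have hsf : ((decide (ch = '.') && decide (0 < i)) && (cs.getD (i - 1) ' ').isDigit) = false :=
              Bool.eq_false_iff.mpr hs
            have hw := hA
            simp only [ht, Bool.true_and, hsf, Bool.not_false, Bool.true_and] at hw
            simp only [pvALoop]
            rw [if_pos ht, if_neg hs]
            show (if ((if i + 1 < cs.length then cs.getD (i + 1) ' ' else ' ') = ' ' || (if i + 1 < cs.length then cs.getD (i + 1) ' ' else ' ') = '\n' || (if i + 1 < cs.length then cs.getD (i + 1) ' ' else ' ') = '\r' || (if i + 1 < cs.length then cs.getD (i + 1) ' ' else ' ') = '\t') = true then ((i : Nat) : Int) else pvALoop cs (i + 1) rest) = _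
            rw [if_neg (fun h => by rw [h] at hw; exact absurd hw (by decide))]
        · simp only [pvALoop]
          rw [if_neg ht]
      rw [hL, hrec]
      simp [hQ]

-- ===== VERDICT (by name: the statement is the Claim_ definition above) =====
theorem find_sentence_end_py_spec : Claim_equal_find_sentence_end_py := by
  intro buf _
  unfold Spec_find_sentence_end_py find_sentence_end_py find_sentence_end_py_alt
  rw [pv_aLoop_eq buf.toList buf.toList 0 (by simp)]
  simp [List.range_eq_range']
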